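-- pv_equiv track=rewrite | github.com/981377660LMT/algorithm-study | 9_排序和搜索/经典题/SelectOneFromEachPair-最小化最大值之和.py | selectOneFromEachPairMinimizeMaxSum
-- ===== SOURCE A (Python) =====
-- from typing import List, Tuple
--
-- def selectOneFromEachPairMinimizeMaxSum(pairs: List[Tuple[int, int]]) -> int:
--     """
--     给定n个对(ai,bi),对每个对,需要选择ai加入集合A,或者选择bi加入集合B.
--     !最小化`max(A)+max(B)`的值.
--     """
--     if not pairs:
--         return 0
--     pairs.sort()
--     sufMax = [b for _, b in pairs] + [0]
--     for i in range(len(sufMax) - 2, -1, -1):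
--         if sufMax[i] < sufMax[i + 1]:
--             sufMax[i] = sufMax[i + 1]
--     res = sufMax[0]
--     for i in range(len(pairs)):
--         res = min(res, pairs[i][0] + sufMax[i + 1])
--     return res
-- ===== SOURCE B (Python) =====
-- from typing import List, Tuple
--
-- def selectOneFromEachPairMinimizeMaxSum(pairs: List[Tuple[int, int]]) -> int:
--     """
--     给定n个对(ai,bi),对每个对,需要选择ai加入集合A,或者选择bi加入集合B.
--     !最小化`max(A)+max(B)`的值.
--     """
--     if not pairs:
--         return 0
--     pairs.sort()
--     res = pairs[-1][0]  # take a of the largest pair; the B-suffix beyond it is empty (max 0)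
--     suf = 0             # running max of b over the suffix already scanned (0 for empty)
--     for a, b in reversed(pairs):
--         if a + suf < res:
--             res = a + suf
--         if b > suf:
--             suf = b
--     return min(res, suf)
-- ===== Notes on version B (the rewrite author's own statement) =====
-- stated objective: simpler
-- what changed: Replaces A's materialized suffix-max table plus a second forward index scan by a single reverse pass that maintains a running suffix maximum of b-values and folds the minimum candidate on the fly (O(1) extra space instead of O(n)).
import Mathlib
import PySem

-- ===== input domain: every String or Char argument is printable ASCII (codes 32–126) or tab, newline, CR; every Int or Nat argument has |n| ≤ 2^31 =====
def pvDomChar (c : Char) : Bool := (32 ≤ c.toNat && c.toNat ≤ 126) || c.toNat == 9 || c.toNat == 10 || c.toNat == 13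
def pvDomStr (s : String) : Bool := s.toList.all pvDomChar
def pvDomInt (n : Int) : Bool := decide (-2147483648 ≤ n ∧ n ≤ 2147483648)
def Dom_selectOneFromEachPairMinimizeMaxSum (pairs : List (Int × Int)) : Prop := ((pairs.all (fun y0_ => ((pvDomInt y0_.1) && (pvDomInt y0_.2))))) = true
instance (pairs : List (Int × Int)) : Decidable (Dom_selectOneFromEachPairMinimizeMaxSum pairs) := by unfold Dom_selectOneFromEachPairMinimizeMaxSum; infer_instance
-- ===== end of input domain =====

-- B replaces A's materialized suffix-max table + second forward scan by one reverse pass with a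
-- running suffix maximum (simpler, O(1) extra space). Both Pythons sort `pairs` in place; the
-- equivalence proved here is about the return value (the in-place sort is identical in A and B).

-- ===== PORT A =====
def selectOneFromEachPairMinimizeMaxSum (pairs : List (Int × Int)) : Int :=
  if pairs = [] then 0
  else
    let ps := PySem.List.sorted2 pairs Prod.fst Prod.snd
    let sufMax0 : List Int := ps.map Prod.snd ++ [0]
    let sufMax := (PySem.List.pyRange ((sufMax0.length : Int) - 2) (-1) (-1)).foldl
      (fun l i =>
        if PySem.List.pyGetD l i 0 < PySem.List.pyGetD l (i + 1) 0 then
          PySem.List.pySetD l i (PySem.List.pyGetD l (i + 1) 0)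
        else l) sufMax0
    let res := PySem.List.pyGetD sufMax 0 0
    (PySem.List.pyRange 0 (ps.length : Int) 1).foldl
      (fun res i =>
        min res ((PySem.List.pyGetD ps i ((0 : Int), (0 : Int))).1
                  + PySem.List.pyGetD sufMax (i + 1) 0)) res

-- ===== PORT B =====
def selectOneFromEachPairMinimizeMaxSum_alt (pairs : List (Int × Int)) : Int :=
  if pairs = [] then 0
  else
    let ps := PySem.List.sorted2 pairs Prod.fst Prod.snd
    let st := ps.reverse.foldl
      (fun (st : Int × Int) p =>
        (if p.1 + st.2 < st.1 then p.1 + st.2 else st.1,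
         if p.2 > st.2 then p.2 else st.2))
      ((PySem.List.pyGetD ps (-1) ((0 : Int), (0 : Int))).1, 0)
    min st.1 st.2

-- ===== PRECONDITION & SPEC =====
def Spec_selectOneFromEachPairMinimizeMaxSum (pairs : List (Int × Int)) (out : Int) : Prop := out = selectOneFromEachPairMinimizeMaxSum_alt pairs
instance (pairs : List (Int × Int)) (out : Int) : Decidable (Spec_selectOneFromEachPairMinimizeMaxSum pairs out) := by unfold Spec_selectOneFromEachPairMinimizeMaxSum; infer_instance

-- ===== CLAIM (what is proved, stated in full; the proofs are below) =====
def Claim_equal_selectOneFromEachPairMinimizeMaxSum : Prop := ∀ (pairs : List (Int × Int)), Dom_selectOneFromEachPairMinimizeMaxSum pairs → Spec_selectOneFromEachPairMinimizeMaxSum pairs (selectOneFromEachPairMinimizeMaxSum pairs)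

-- ===== LEMMAS AND PROOFS =====

-- suffix maximum of the b-components, the empty suffix counting as 0
def pvSm (t : List (Int × Int)) : Int := (t.map Prod.snd).foldr max 0

-- candidate list: for each position, its a-value plus the b-suffix-max strictly after it
def pvC : List (Int × Int) → List Int
  | [] => []
  | p :: t => (p.1 + pvSm t) :: pvC t

-- A's table-building step, named so the loop lemma can speak about it
def pvUpd (l : List Int) (i : Int) : List Int :=
  if PySem.List.pyGetD l i 0 < PySem.List.pyGetD l (i + 1) 0 then
    PySem.List.pySetD l i (PySem.List.pyGetD l (i + 1) 0)
  else l

-- the fully propagated suffix-max table, as a foldr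
def pvScan (xs : List Int) (ys : List Int) : List Int :=
  xs.foldr (fun x acc => max x (acc.headD 0) :: acc) ys

theorem pvUpd_step (xs ys : List Int) (x y : Int) (t : List Int) (h : ys = y :: t) :
    pvUpd (xs ++ [x] ++ ys) (xs.length : Int) = xs ++ [max x y] ++ ys := by
  subst h
  have hget : PySem.List.pyGetD (xs ++ [x] ++ (y :: t)) (xs.length : Int) 0 = x := by
    rw [PySem.List.pyGetD_natCast]
    rw [List.append_assoc]
    rw [List.getD_eq_getElem?_getD, List.getElem?_append_right (by simp)]
    simp
  have hget1 : PySem.List.pyGetD (xs ++ [x] ++ (y :: t)) ((xs.length : Int) + 1) 0 = y := by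
    rw [show ((xs.length : Int) + 1) = ((xs.length + 1 : Nat) : Int) by push_cast; ring]
    rw [PySem.List.pyGetD_natCast]
    rw [List.append_assoc]
    rw [List.getD_eq_getElem?_getD, List.getElem?_append_right (by simp)]
    simp
  have hset : ∀ v : Int, PySem.List.pySetD (xs ++ [x] ++ (y :: t)) (xs.length : Int) v
      = xs ++ [v] ++ (y :: t) := by
    intro v
    rw [PySem.List.pySetD_natCast, List.append_assoc, List.set_append_right _ _ (le_refl _)]
    simp
  unfold pvUpd
  rw [hget, hget1, hset]
  split <;> simp <;> omega

theorem pvLoop (j : Nat) (xs ys : List Int) (hx : xs.length = j) (hy : ys ≠ []) :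
    (PySem.List.pyRange ((j : Int) - 1) (-1) (-1)).foldl pvUpd (xs ++ ys) = pvScan xs ys := by
  induction j generalizing xs ys with
  | zero =>
    have hxs : xs = [] := List.eq_nil_of_length_eq_zero hx
    subst hxs
    rw [PySem.List.pyRange_neg_one_eq_nil (by omega)]
    rfl
  | succ j ih =>
    obtain ⟨xs', x, rfl⟩ := (List.eq_nil_or_concat xs).resolve_left
      (by intro h; subst h; simp at hx)
    simp only [List.concat_eq_append] at hx ⊢
    obtain ⟨y, t, rfl⟩ : ∃ y t, ys = y :: t := by
      cases ys with
      | nil => exact absurd rfl hy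
      | cons a b => exact ⟨a, b, rfl⟩
    have hx' : xs'.length = j := by simpa using hx
    rw [show ((j + 1 : Nat) : Int) - 1 = (j : Int) by push_cast; ring]
    rw [PySem.List.pyRange_neg_one_cons (by omega), List.foldl_cons]
    rw [show (xs' ++ [x]) ++ (y :: t) = xs' ++ [x] ++ (y :: t) from rfl]
    rw [show (j : Int) = (xs'.length : Int) by rw [hx']]
    rw [pvUpd_step _ _ _ y t rfl]
    rw [show xs' ++ [max x y] ++ (y :: t) = xs' ++ (max x y :: y :: t) by simp]
    rw [hx']
    rw [ih xs' (max x y :: y :: t) hx' (by simp)]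
    show pvScan xs' _ = pvScan (xs' ++ [x]) (y :: t)
    rw [pvScan, pvScan, List.foldr_append]
    rfl

theorem pvScan_getD (t : List (Int × Int)) (i : Nat) (hi : i ≤ t.length) :
    (pvScan (t.map Prod.snd) [0]).getD i 0 = pvSm (t.drop i) := by
  induction t generalizing i with
  | nil =>
    have : i = 0 := by simpa using hi
    subst this; rfl
  | cons p t ih =>
    cases i with
    | zero =>
      have h0 := ih 0 (by omega)
      simp only [pvScan, List.map_cons, List.foldr_cons, List.getD_cons_zero, List.drop_zero] at *
      simp only [pvSm, List.map_cons, List.foldr_cons]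
      congr 1
      cases h : (t.map Prod.snd).foldr (fun x acc => max x (acc.headD 0) :: acc) [0] with
      | nil =>
        exfalso
        induction t with
        | nil => simp at h
        | cons q t _ => simp [List.foldr_cons] at h
      | cons y l =>
        rw [h] at h0; simpa [pvSm] using h0
    | succ i =>
      simp only [pvScan, List.map_cons, List.foldr_cons, List.getD_cons_succ, List.drop_succ_cons]
      exact ih i (by simpa using hi)

theorem pvC_eq (s : List (Int × Int)) :
    pvC s = (List.range s.length).map
      (fun k => (s.getD k ((0 : Int), (0 : Int))).1 + pvSm (s.drop (k + 1))) := by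
  induction s with
  | nil => rfl
  | cons p t ih =>
    simp only [pvC, List.length_cons, List.range_succ_eq_map, List.map_cons, List.map_map]
    rw [ih]
    congr 1

theorem pvC_concat (s : List (Int × Int)) (h : s ≠ []) :
    ∃ cs, pvC s = cs ++ [(s.getLast h).1] := by
  induction s with
  | nil => exact absurd rfl h
  | cons p t ih =>
    cases t with
    | nil => exact ⟨[], by simp [pvC, pvSm]⟩
    | cons q u =>
      obtain ⟨cs, hcs⟩ := ih (by simp)
      refine ⟨(p.1 + pvSm (q :: u)) :: cs, ?_⟩
      show (p.1 + pvSm (q :: u)) :: pvC (q :: u) = _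
      rw [hcs]
      simp

theorem pvFoldlMin (cs : List Int) (a b : Int) :
    (cs ++ [a]).foldl min b = min b (cs.foldr min a) := by
  induction cs generalizing b with
  | nil => simp
  | cons x cs ih => simp only [List.cons_append, List.foldl_cons, List.foldr_cons, ih]; omega

theorem pvBfold (t : List (Int × Int)) (r0 : Int) :
    t.foldr (fun p (st : Int × Int) =>
        (if p.1 + st.2 < st.1 then p.1 + st.2 else st.1,
         if p.2 > st.2 then p.2 else st.2)) (r0, 0)
      = ((pvC t).foldr min r0, pvSm t) := by
  induction t with
  | nil => rfl
  | cons p t ih =>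
    simp only [List.foldr_cons, ih, Prod.mk.injEq]
    rw [show pvSm (p :: t) = max p.2 (pvSm t) from rfl,
        show pvC (p :: t) = (p.1 + pvSm t) :: pvC t from rfl, List.foldr_cons]
    constructor <;> · split <;> omega

theorem pvMain (pairs : List (Int × Int)) :
    selectOneFromEachPairMinimizeMaxSum pairs = selectOneFromEachPairMinimizeMaxSum_alt pairs := by
  by_cases hp : pairs = []
  · simp [selectOneFromEachPairMinimizeMaxSum, selectOneFromEachPairMinimizeMaxSum_alt, hp]
  · simp only [selectOneFromEachPairMinimizeMaxSum, selectOneFromEachPairMinimizeMaxSum_alt,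
      if_neg hp]
    have hne : PySem.List.sorted2 pairs Prod.fst Prod.snd ≠ [] := by
      intro h
      have := (PySem.List.sorted2_perm pairs Prod.fst Prod.snd false).length_eq
      rw [h] at this
      exact hp (List.eq_nil_of_length_eq_zero this.symm)
    generalize PySem.List.sorted2 pairs Prod.fst Prod.snd = ps at hne ⊢
    have hlen : ((ps.map Prod.snd ++ [0]).length : Int) - 2 = ((ps.length : Int)) - 1 := by
      simp only [List.length_append, List.length_map, List.length_cons, List.length_nil]
      push_cast
      ring
    rw [hlen]
    have htab : (PySem.List.pyRange ((ps.length : Int) - 1) (-1) (-1)).foldl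
        (fun l i =>
          if PySem.List.pyGetD l i 0 < PySem.List.pyGetD l (i + 1) 0 then
            PySem.List.pySetD l i (PySem.List.pyGetD l (i + 1) 0)
          else l) (ps.map Prod.snd ++ [0]) = pvScan (ps.map Prod.snd) [0] := by
      rw [show (fun l i =>
          if PySem.List.pyGetD l i 0 < PySem.List.pyGetD l (i + 1) 0 then
            PySem.List.pySetD l i (PySem.List.pyGetD l (i + 1) 0)
          else l) = pvUpd from rfl]
      exact pvLoop ps.length (ps.map Prod.snd) [0] (by simp) (by simp)
    rw [htab]
    rw [PySem.List.pyGetD_zero]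
    rw [show (pvScan (ps.map Prod.snd) [0]).getD 0 0 = pvSm ps by
      simpa using pvScan_getD ps 0 (by omega)]
    rw [PySem.List.pyRange_zero_natCast, List.foldl_map]
    rw [PySem.List.foldl_congr_mem (List.range ps.length) _
      (fun res k => min res ((ps.getD k ((0 : Int), (0 : Int))).1 + pvSm (ps.drop (k + 1))))
      (pvSm ps)
      (by
        intro acc k hk
        rw [List.mem_range] at hk
        rw [PySem.List.pyGetD_natCast]
        rw [show ((k : Int) + 1) = ((k + 1 : Nat) : Int) by push_cast; ring]
        rw [PySem.List.pyGetD_natCast]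
        rw [pvScan_getD ps (k + 1) (by omega)])]
    rw [show (List.range ps.length).foldl
        (fun res k => min res ((ps.getD k ((0 : Int), (0 : Int))).1 + pvSm (ps.drop (k + 1))))
        (pvSm ps) = (pvC ps).foldl min (pvSm ps) by
      rw [pvC_eq, List.foldl_map]]
    simp only [List.foldl_reverse]
    rw [pvBfold]
    rw [PySem.List.pyGetD_neg_one ps _ hne]
    obtain ⟨cs, hcs⟩ := pvC_concat ps hne
    rw [hcs, pvFoldlMin, List.foldr_append]
    simp only [List.foldr_cons, List.foldr_nil, min_self]
    omega

-- ===== VERDICT (by name: the statement is the Claim_ definition above) =====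
theorem selectOneFromEachPairMinimizeMaxSum_spec : Claim_equal_selectOneFromEachPairMinimizeMaxSum := by
  intro pairs _
  exact pvMain pairs
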